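-- pv_equiv track=rewrite | github.com/zhugit/ids-logvision | backend/app/services/trace/plugins/generic.py | extract_fingerprint
-- ===== SOURCE A (Python) =====
-- from typing import Any, Dict, List
--
-- def extract_fingerprint(rawlogs: List[Any]) -> Dict[str, Any]:
--     # 最小指纹：协议 + top path
--     paths = []
--     proto = ""
--     for r in rawlogs:
--         if not proto and r.get("protocol"):
--             proto = r["protocol"]
--         p = r.get("path")
--         if p:
--             paths.append(p)
--     top_path = paths[0] if paths else ""
--     return {"kind": "Generic", "protocol": proto, "top_path": top_path}
-- ===== SOURCE B (Python) =====
-- from typing import Any, Dict, List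
--
-- def extract_fingerprint(rawlogs: List[Any]) -> Dict[str, Any]:
--     proto = next((r["protocol"] for r in rawlogs if r.get("protocol")), "")
--     top_path = next((r["path"] for r in rawlogs if r.get("path")), "")
--     return {"kind": "Generic", "protocol": proto, "top_path": top_path}
-- ===== Notes on version B (the rewrite author's own statement) =====
-- stated objective: idiomatic
-- what changed: Replaces the single fused accumulator loop (path list + protocol state) with two independent early-exiting next(...) searches, one per field; no path list is built at all.
import Mathlib
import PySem

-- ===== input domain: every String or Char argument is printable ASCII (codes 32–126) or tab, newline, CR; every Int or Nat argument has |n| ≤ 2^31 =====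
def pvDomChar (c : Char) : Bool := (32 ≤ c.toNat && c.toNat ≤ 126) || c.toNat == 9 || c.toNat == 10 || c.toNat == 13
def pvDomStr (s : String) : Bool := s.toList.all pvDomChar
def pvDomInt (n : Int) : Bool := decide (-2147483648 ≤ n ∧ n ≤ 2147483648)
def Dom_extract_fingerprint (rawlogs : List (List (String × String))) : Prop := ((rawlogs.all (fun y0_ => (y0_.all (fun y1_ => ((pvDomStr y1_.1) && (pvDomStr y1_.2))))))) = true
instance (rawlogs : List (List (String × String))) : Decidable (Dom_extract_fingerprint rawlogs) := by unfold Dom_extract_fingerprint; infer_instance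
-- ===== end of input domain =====

-- B replaces A's fused accumulator loop by two independent early-exit searches (one per field); same results, more idiomatic.

-- shared primitive: Python's r.get(k) on the dict-as-association-list
def fpGet (r : List (String × String)) (k : String) : Option String :=
  (PySem.Dict.ofList r).get? k

-- truthiness of r.get(k): None and "" are falsy
def fpTruthy (o : Option String) : Bool :=
  match o with
  | some s => s ≠ ""
  | none => false

-- ===== PORT A =====
-- A's loop body: state = (paths, proto)
def fpStep (st : List String × String) (r : List (String × String)) : List String × String :=
  let proto := if st.2 = "" ∧ fpTruthy (fpGet r "protocol") then (fpGet r "protocol").getD "" else st.2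
  let paths := if fpTruthy (fpGet r "path") then st.1 ++ [(fpGet r "path").getD ""] else st.1
  (paths, proto)

def extract_fingerprint (rawlogs : List (List (String × String))) : List (String × String) :=
  let st := rawlogs.foldl fpStep ([], "")
  let top_path := if st.1 ≠ [] then st.1.headD "" else ""
  [("kind", "Generic"), ("protocol", st.2), ("top_path", top_path)]

-- ===== PORT B =====
-- next((r[k] for r in rawlogs if r.get(k)), ""): first truthy value under key k, else ""
def fpFirst (rawlogs : List (List (String × String))) (k : String) : String :=
  match rawlogs with
  | [] => ""
  | r :: rs => if fpTruthy (fpGet r k) then (fpGet r k).getD "" else fpFirst rs k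

def extract_fingerprint_alt (rawlogs : List (List (String × String))) : List (String × String) :=
  [("kind", "Generic"), ("protocol", fpFirst rawlogs "protocol"), ("top_path", fpFirst rawlogs "path")]

-- ===== PRECONDITION & SPEC =====
def Spec_extract_fingerprint (rawlogs : List (List (String × String))) (out : List (String × String)) : Prop := out = extract_fingerprint_alt rawlogs
instance (rawlogs : List (List (String × String))) (out : List (String × String)) : Decidable (Spec_extract_fingerprint rawlogs out) := by unfold Spec_extract_fingerprint; infer_instance

-- ===== CLAIM (what is proved, stated in full; the proofs are below) =====
def Claim_equal_extract_fingerprint : Prop := ∀ (rawlogs : List (List (String × String))), Dom_extract_fingerprint rawlogs → Spec_extract_fingerprint rawlogs (extract_fingerprint rawlogs)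

-- ===== LEMMAS AND PROOFS =====

-- the truthy path values A accumulates, starting from an empty list
def fpColl (rawlogs : List (List (String × String))) : List String :=
  match rawlogs with
  | [] => []
  | r :: rs => if fpTruthy (fpGet r "path") then (fpGet r "path").getD "" :: fpColl rs else fpColl rs

theorem fpFold_fst (rs : List (List (String × String))) (paths : List String) (p : String) :
    (rs.foldl fpStep (paths, p)).1 = paths ++ fpColl rs := by
  induction rs generalizing paths p with
  | nil => simp [fpColl]
  | cons r rs ih => simp only [List.foldl_cons, fpStep, fpColl]; split_ifs <;> simp [ih]

theorem fpTruthy_getD {o : Option String} (h : fpTruthy o = true) : o.getD "" ≠ "" := by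
  cases o <;> simp_all [fpTruthy]

theorem fpFold_snd (rs : List (List (String × String))) (paths : List String) (p : String) :
    (rs.foldl fpStep (paths, p)).2 = if p = "" then fpFirst rs "protocol" else p := by
  induction rs generalizing paths p with
  | nil => simp [fpFirst]
  | cons r rs ih =>
    simp only [List.foldl_cons, fpStep]
    rw [ih]
    simp only [fpFirst]
    by_cases hp : p = "" <;> by_cases ht : fpTruthy (fpGet r "protocol") = true
    · simp [hp, ht, fpTruthy_getD ht]
    · simp [hp, ht]
    · simp [hp, ht]
    · simp [hp, ht]

theorem fpColl_head (rs : List (List (String × String))) :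
    (if fpColl rs ≠ [] then (fpColl rs).headD "" else "") = fpFirst rs "path" := by
  induction rs with
  | nil => simp [fpColl, fpFirst]
  | cons r rs ih =>
    simp only [fpColl, fpFirst]
    by_cases h : fpTruthy (fpGet r "path") = true
    · simp [h]
    · rw [← ih]; simp only [h, Bool.false_eq_true, if_false, ne_eq, ite_not]

-- ===== VERDICT (by name: the statement is the Claim_ definition above) =====
theorem extract_fingerprint_spec : Claim_equal_extract_fingerprint := by
  intro rawlogs _
  unfold Spec_extract_fingerprint extract_fingerprint extract_fingerprint_alt
  simp only [fpFold_fst rawlogs [] "", fpFold_snd rawlogs [] "", List.nil_append]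
  rw [fpColl_head]; simp
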